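-- pv_equiv track=rewrite | github.com/jayasurya-n/Contests | GFG_Contest/GFG_Weekly_161/q2.py | MinSize
-- ===== SOURCE A (Python) =====
-- from typing import List
--
-- def MinSize(n : int, arr : List[int]) -> int:
--     freq = {}
--     for i in range(n):
--         freq[arr[i]] = freq.setdefault(arr[i],0)+1
--
--     maxFreq = -1
--     for key,value in freq.items():
--         maxFreq = max(maxFreq,value)
--
--     if(maxFreq>=n/2):
--         return maxFreq-(n-maxFreq)
--     elif(n%2==1):return 1
--     else:return 0
-- ===== SOURCE B (Python) =====
-- from typing import List
--
-- def MinSize(n: int, arr: List[int]) -> int: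
--     # Boyer-Moore majority vote over the first n elements: no frequency table,
--     # just a candidate and two counters.
--     cand, votes = None, 0
--     for i in range(n):
--         x = arr[i]
--         if votes == 0:
--             cand, votes = x, 1
--         elif x == cand:
--             votes += 1
--         else:
--             votes -= 1
--     count = 0
--     for i in range(n):
--         if arr[i] == cand:
--             count += 1
--     if 2 * count > n:
--         return 2 * count - n
--     return n % 2
-- ===== Notes on version B (the rewrite author's own statement) =====
-- stated objective: alternative
-- what changed: Replaces the frequency dictionary + max-over-values scan with the Boyer-Moore majority vote (one pass keeping a candidate and a counter, one pass counting the candidate), so no hash table is built and only scalars are maintained.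
-- outside the precondition, e.g. on MinSize(-3, []): A returns 1, B returns 3
import Mathlib
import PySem

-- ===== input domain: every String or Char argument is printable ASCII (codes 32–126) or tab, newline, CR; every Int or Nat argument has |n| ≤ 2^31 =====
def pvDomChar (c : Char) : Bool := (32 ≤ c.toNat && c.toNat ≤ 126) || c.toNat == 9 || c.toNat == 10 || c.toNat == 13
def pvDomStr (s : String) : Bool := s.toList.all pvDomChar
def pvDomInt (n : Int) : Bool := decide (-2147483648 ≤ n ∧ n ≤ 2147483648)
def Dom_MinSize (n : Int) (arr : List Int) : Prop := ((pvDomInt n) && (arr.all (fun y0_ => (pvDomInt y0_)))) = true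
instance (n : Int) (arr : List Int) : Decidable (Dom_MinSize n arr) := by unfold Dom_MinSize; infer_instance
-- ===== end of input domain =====

-- B replaces A's frequency dictionary + max-over-values scan by the Boyer-Moore majority
-- vote (candidate + counter, then one counting pass): an alternative algorithm with O(1)
-- extra space instead of a hash table.


-- ===== PORT A =====
-- arr[i] is PySem.List.pyGet? arr i, with Option.elim: the none (IndexError) case,
-- excluded by Pre_, leaves the accumulator unchanged.
def MinSize (n : Int) (arr : List Int) : Int :=
  let freq := (PySem.List.pyRange 0 n).foldl
    (fun d i => (PySem.List.pyGet? arr i).elim d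
      (fun x =>
        let d1 := d.setdefault x 0              -- freq.setdefault(arr[i], 0)
        d1.insert x (d1.getD x 0 + 1)))         -- freq[arr[i]] = ... + 1
    (PySem.Dict.empty : PySem.Dict Int Int)
  let maxFreq := freq.items.foldl (fun m p => max m p.2) (-1)
  if 2 * maxFreq ≥ n then maxFreq - (n - maxFreq)    -- maxFreq >= n/2: exact on integers
  else if PySem.Int.mod n 2 = 1 then 1
  else 0

-- ===== PORT B =====
def MinSize_alt (n : Int) (arr : List Int) : Int :=
  let s := (PySem.List.pyRange 0 n).foldl            -- Boyer-Moore vote pass: (cand, votes)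
    (fun s i => (PySem.List.pyGet? arr i).elim s     -- arr[i]; none = IndexError, excluded by Pre_
      (fun x =>
        if s.2 = 0 then ((some x : Option Int), (1 : Int))
        else if some x = s.1 then (s.1, s.2 + 1)     -- x == cand (cand is None-or-int: Option Int)
        else (s.1, s.2 - 1)))
    ((none : Option Int), (0 : Int))
  let count := (PySem.List.pyRange 0 n).foldl        -- counting pass for the candidate
    (fun c i => (PySem.List.pyGet? arr i).elim c
      (fun x => if some x = s.1 then c + 1 else c))
    (0 : Int)
  if 2 * count > n then 2 * count - n else PySem.Int.mod n 2

-- ===== PRECONDITION & SPEC =====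
-- Pre_ excludes n > len(arr), where A raises IndexError, and n < 0, a meaningless size
-- parameter on which A's sentinel-driven value (maxFreq = -1 compared against n/2) and
-- B's value are both accidental and neither would be specified.
def Pre_MinSize (n : Int) (arr : List Int) : Prop := 0 ≤ n ∧ n ≤ arr.length
instance (n : Int) (arr : List Int) : Decidable (Pre_MinSize n arr) := by unfold Pre_MinSize; infer_instance
def pvWitness_MinSize : Int × List Int := (3, [1, 1, 2])
def Spec_MinSize (n : Int) (arr : List Int) (out : Int) : Prop := out = MinSize_alt n arr
instance (n : Int) (arr : List Int) (out : Int) : Decidable (Spec_MinSize n arr out) := by unfold Spec_MinSize; infer_instance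

-- ===== CLAIM (what is proved, stated in full; the proofs are below) =====
def Claim_equal_MinSize : Prop := ∀ (n : Int) (arr : List Int), Dom_MinSize n arr → Pre_MinSize n arr → Spec_MinSize n arr (MinSize n arr)

-- ===== LEMMAS AND PROOFS =====

-- A 'for i in range(n)' loop reading arr[i], with n within bounds, is a fold over take.
set_option maxRecDepth 4096 in
theorem pv_foldl_range_get {β : Type} (arr : List Int) (m : Nat) (h : m ≤ arr.length)
    (f : β → Int → β) (g : β → β) (init : β) :
    (PySem.List.pyRange 0 (m : Int)).foldl
      (fun b i => (PySem.List.pyGet? arr i).elim (g b) (f b)) init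
    = (arr.take m).foldl f init := by
  induction m generalizing init with
  | zero => simp [PySem.List.pyRange]
  | succ m ih =>
    have hm : m < arr.length := by omega
    have hcast : ((m + 1 : Nat) : Int) = (m : Int) + 1 := by push_cast; ring
    rw [hcast, PySem.List.pyRange_one_succ_right (by positivity), List.foldl_append, ih (by omega)]
    simp only [List.foldl_cons, List.foldl_nil]
    rw [PySem.List.pyGet?_natCast, List.getElem?_eq_getElem hm, List.take_add_one,
      List.getElem?_eq_getElem hm, Option.toList_some, List.foldl_append,
      List.foldl_cons, List.foldl_nil]
    simp

-- A's loop body is the standard counting update.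
theorem pv_stepA_eq (d : PySem.Dict Int Int) (x : Int) :
    ((d.setdefault x 0).insert x ((d.setdefault x 0).getD x 0 + 1))
      = d.insert x (d.getD x 0 + 1) := by
  cases hc : d.contains x with
  | true => rw [PySem.Dict.setdefault_of_contains d 0 hc]
  | false =>
    rw [PySem.Dict.setdefault_of_not_contains d 0 hc, PySem.Dict.getD_insert_self,
      PySem.Dict.insert_insert_self, PySem.Dict.getD_of_not_contains d 0 hc]

-- Boyer-Moore vote: step function and weight of a value in a state.
def pvBmf (s : Option Int × Int) (x : Int) : Option Int × Int :=
  if s.2 = 0 then ((some x : Option Int), (1 : Int))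
  else if some x = s.1 then (s.1, s.2 + 1)
  else (s.1, s.2 - 1)

def pvBmw (x : Int) (s : Option Int × Int) : Int := if some x = s.1 then s.2 else -s.2

theorem pv_bm_inv (l : List Int) (s : Option Int × Int) (hs : 0 ≤ s.2) :
    0 ≤ (l.foldl pvBmf s).2 ∧
      ∀ x : Int, 2 * (l.count x : Int) + pvBmw x s ≤ (l.length : Int) + pvBmw x (l.foldl pvBmf s) := by
  induction l generalizing s with
  | nil => exact ⟨hs, fun x => by simp⟩
  | cons y l ih =>
    have hs' : 0 ≤ (pvBmf s y).2 := by
      unfold pvBmf; split_ifs <;> simp <;> omega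
    obtain ⟨h1, h2⟩ := ih (pvBmf s y) hs'
    refine ⟨by simpa using h1, fun x => ?_⟩
    have hstep : 2 * (if x = y then (1 : Int) else 0) + pvBmw x s ≤ 1 + pvBmw x (pvBmf s y) := by
      unfold pvBmf pvBmw
      split_ifs <;> try simp_all
      all_goals omega
    have h2x := h2 x
    have hcount : ((y :: l).count x : Int) = (l.count x : Int) + (if x = y then 1 else 0) := by
      rcases eq_or_ne x y with hxy | hxy
      · subst hxy; simp
      · simp [hxy, Ne.symm hxy]
    have hlen : (((y :: l).length : Nat) : Int) = (l.length : Int) + 1 := by simp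
    rw [List.foldl_cons] at *
    rw [hcount, hlen]
    omega

-- No non-candidate can exceed half of the scanned prefix.
theorem pv_bm_bound (l : List Int) (x : Int)
    (hne : some x ≠ (l.foldl pvBmf ((none : Option Int), (0 : Int))).1) :
    2 * (l.count x : Int) ≤ (l.length : Int) := by
  obtain ⟨h1, h2⟩ := pv_bm_inv l ((none : Option Int), (0 : Int)) le_rfl
  have hx := h2 x
  unfold pvBmw at hx
  rw [if_neg hne] at hx
  simp at hx
  omega

-- ===== VERDICT (by name: the statement is the Claim_ definition above) =====
theorem MinSize_spec : Claim_equal_MinSize := by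
  intro n arr _ hpre
  obtain ⟨h0, hlen⟩ := hpre
  simp only [Spec_MinSize, MinSize, MinSize_alt]
  set m := n.toNat with hmdef
  have hn : (m : Int) = n := Int.toNat_of_nonneg h0
  have hmle : m ≤ arr.length := by omega
  set t := arr.take m with htdef
  have htlen : (t.length : Int) = n := by
    rw [htdef, List.length_take]; omega
  rw [← hn]
  rw [pv_foldl_range_get arr m hmle
    (f := fun (d : PySem.Dict Int Int) x => (d.setdefault x 0).insert x ((d.setdefault x 0).getD x 0 + 1))
    (g := fun d => d)]
  rw [pv_foldl_range_get arr m hmle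
    (f := fun (s : Option Int × Int) x => if s.2 = 0 then ((some x : Option Int), (1 : Int))
      else if some x = s.1 then (s.1, s.2 + 1) else (s.1, s.2 - 1))
    (g := fun s => s)]
  rw [show (fun (s : Option Int × Int) (x : Int) => if s.2 = 0 then ((some x : Option Int), (1 : Int))
      else if some x = s.1 then (s.1, s.2 + 1) else (s.1, s.2 - 1)) = pvBmf from rfl]
  rw [PySem.List.foldl_congr_mem t _ _ (PySem.Dict.empty : PySem.Dict Int Int)
    (fun acc x _ => pv_stepA_eq acc x),
    PySem.Dict.foldl_insert_getD_add_one_eq_counter]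
  set s' := t.foldl pvBmf ((none : Option Int), (0 : Int)) with hs'def
  rw [pv_foldl_range_get arr m hmle
    (f := fun (c : Int) x => if some x = s'.1 then c + 1 else c)
    (g := fun c => c)]
  rw [hn]
  set M := (PySem.Dict.counter t).items.foldl (fun m p => max m p.2) (-1 : Int) with hMdef
  set C := t.foldl (fun c x => if some x = s'.1 then c + 1 else c) (0 : Int) with hCdef
  -- characterise M as the running max of the counts of the distinct elements of t
  have hMfold : M = (PySem.Set.ofList t).foldl (fun acc k => max acc ((t.count k : Nat) : Int)) (-1 : Int) := by
    rw [hMdef, PySem.Dict.items_counter, List.foldl_map]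
  have hMbound : ∀ x ∈ t, ((t.count x : Nat) : Int) ≤ M := by
    intro x hx
    rw [hMfold]
    exact (PySem.List.le_foldl_max_int (PySem.Set.ofList t) _ (-1)).2 x
      ((PySem.Set.mem_ofList t x).mpr hx)
  have hMach : M = -1 ∨ ∃ k ∈ t, M = ((t.count k : Nat) : Int) := by
    have hMmap : M = ((PySem.Set.ofList t).map (fun k => ((t.count k : Nat) : Int))).foldl max (-1 : Int) := by
      rw [hMfold, List.foldl_map]
    rcases PySem.List.foldl_max_mem ((PySem.Set.ofList t).map (fun k => ((t.count k : Nat) : Int))) (-1 : Int)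
      with h | h
    · exact Or.inl (hMmap.trans h)
    · right
      rw [hMmap]
      obtain ⟨k, hk, hkv⟩ := List.mem_map.mp h
      exact ⟨k, (PySem.Set.mem_ofList t k).mp hk, hkv.symm⟩
  -- characterise C
  have hCvals : C = 0 ∨ ∃ y ∈ t, s'.1 = some y ∧ C = ((t.count y : Nat) : Int) := by
    cases hcase : s'.1 with
    | none =>
      left
      rw [hCdef]
      have hconst : ∀ (c : Int), ∀ x ∈ t, (if some x = s'.1 then c + 1 else c) = c := by
        intro c x _; rw [hcase]; simp
      rw [PySem.List.foldl_congr_mem t _ (fun c _ => c) 0 hconst, PySem.List.foldl_ignore]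
    | some y =>
      have hCy : C = ((t.count y : Nat) : Int) := by
        rw [hCdef]
        have hcon : ∀ (c : Int), ∀ x ∈ t, (if some x = s'.1 then c + 1 else c)
            = (if x == y then c + 1 else c) := by
          intro c x _; rw [hcase]; by_cases hxy : x = y <;> simp [hxy]
        rw [PySem.List.foldl_congr_mem t _ _ 0 hcon, PySem.List.foldl_beq_add_one]
        simp
      by_cases hy : y ∈ t
      · exact Or.inr ⟨y, hy, rfl, hCy⟩
      · left
        rw [hCy, List.count_eq_zero_of_not_mem hy]
        rfl
  have hC2 : 2 * C ≤ 2 * M ∨ C = 0 := by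
    rcases hCvals with h | ⟨y, hy, _, hCy⟩
    · exact Or.inr h
    · exact Or.inl (by have := hMbound y hy; omega)
  -- main case analysis
  rcases lt_trichotomy (2 * M) n with hlt | heq | hgt
  · -- no majority: both sides give n % 2
    have hCsmall : ¬ (2 * C > n) := by rcases hC2 with h | h <;> omega
    have hmod01 : PySem.Int.mod n 2 = 0 ∨ PySem.Int.mod n 2 = 1 := by
      have := PySem.Int.mod_nonneg n (b := 2) (by omega)
      have := PySem.Int.mod_lt n (b := 2) (by omega)
      omega
    rw [if_neg (by omega), if_neg hCsmall]
    rcases hmod01 with h | h <;> rw [h] <;> norm_num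
  · -- exact half: A returns 0, B falls through to n % 2 = 0
    have hCsmall : ¬ (2 * C > n) := by rcases hC2 with h | h <;> omega
    have heven : PySem.Int.mod n 2 = 0 := (PySem.Int.mod_eq_zero_iff_dvd n 2).mpr ⟨M, by omega⟩
    rw [if_pos (by omega), if_neg hCsmall, heven]
    omega
  · -- strict majority: the maximiser must be the candidate
    rcases hMach with h | ⟨k, hk, hMk⟩
    · omega
    have hcand : some k = s'.1 := by
      by_contra hne
      rw [hs'def] at hne
      have hb := pv_bm_bound t k hne
      omega
    have hCk : C = M := by
      rcases hCvals with h | ⟨y, _, hy1, hCy⟩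
      · exfalso
        have hcon : ∀ (c : Int), ∀ x ∈ t, (if some x = s'.1 then c + 1 else c)
            = (if x == k then c + 1 else c) := by
          intro c x _; rw [← hcand]; by_cases hxk : x = k <;> simp [hxk]
        rw [hCdef, PySem.List.foldl_congr_mem t _ _ 0 hcon,
          PySem.List.foldl_beq_add_one] at h
        have hkpos : 0 < t.count k := List.count_pos_iff.mpr hk
        omega
      · rw [hy1] at hcand
        have hyk : y = k := by injection hcand.symm
        rw [hCy, hyk, ← hMk]
    rw [if_pos (by omega), if_pos (by omega)]
    omega
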